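-- pv_equiv track=rewrite | github.com/Epsilon31/TD_Python | Tutorial_1.py | text_analysis
-- ===== SOURCE A (Python) =====
-- def text_analysis(text):
--     compteur = 0
--     compteur_words= 0
--     compteur_vowels = 0
--     compteur_words_vowels = 0 #count words containing only two or more vowels
--     L_vow=['a','e','i','o','u','y']
--
--     L = text.split()
--     compteur_words = len(L)
--
--     for i in range(len(text)):
--         for j in range(len(L_vow)):
--             if text[i] == L_vow[j]:
--                 compteur_vowels += 1
--
--     for i in L:
--         compteur = 0
--         for j in range(len(i)):
--             for k in range(len(L_vow)):
--                 if i[j] == L_vow[k]: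
--                     compteur += 1
--         if compteur >=2:
--             compteur_words_vowels +=1
--
--
--     return compteur_words_vowels, compteur_vowels, compteur_words
-- ===== SOURCE B (Python) =====
-- def text_analysis(text):
--     vowels = set('aeiouy')
--     words = text.split()
--     total_vowels = 0
--     words_2plus = 0
--     for w in words:
--         c = sum(ch in vowels for ch in w)
--         total_vowels += c
--         if c >= 2:
--             words_2plus += 1
--     return words_2plus, total_vowels, len(words)
-- ===== Notes on version B (the rewrite author's own statement) =====
-- stated objective: faster
-- what changed: B replaces A's three index-based scans (a 6-iteration inner loop over the vowel list for every character of the text, and again for every character of every word) with a single pass over the split words, summing per-word vowel counts via O(1) set membership; the whole-text vowel scan disappears because whitespace contains no vowels.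
import Mathlib
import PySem

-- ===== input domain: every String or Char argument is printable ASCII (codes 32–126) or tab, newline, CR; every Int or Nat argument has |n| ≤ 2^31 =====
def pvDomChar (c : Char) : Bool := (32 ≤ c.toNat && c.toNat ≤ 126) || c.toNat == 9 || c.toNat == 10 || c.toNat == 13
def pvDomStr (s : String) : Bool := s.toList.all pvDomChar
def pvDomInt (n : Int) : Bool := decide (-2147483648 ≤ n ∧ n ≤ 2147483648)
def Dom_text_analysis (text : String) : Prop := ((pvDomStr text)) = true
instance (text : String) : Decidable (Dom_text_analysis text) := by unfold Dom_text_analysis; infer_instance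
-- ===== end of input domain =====

-- B replaces A's three index-based scans (char-by-index against the vowel list, twice) with one
-- pass over the split words summing per-word vowel counts; same results, simpler decomposition.


-- ===== PORT A =====
def text_analysis (text : String) : Int × Int × Int :=
  let lVow : List Char := ['a', 'e', 'i', 'o', 'u', 'y']
  let L : List String := PySem.Str.split₀ text
  let compteurWords : Int := PySem.List.len L
  let compteurVowels : Int :=
    (PySem.List.pyRange 0 (PySem.Str.len text)).foldl (fun acc i =>
      (PySem.List.pyRange 0 (PySem.List.len lVow)).foldl (fun acc2 j =>
        if PySem.Str.pyGet? text i = PySem.List.pyGet? lVow j then acc2 + 1 else acc2) acc) 0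
  let compteurWordsVowels : Int :=
    L.foldl (fun acc w =>
      let compteur : Int :=
        (PySem.List.pyRange 0 (PySem.Str.len w)).foldl (fun acc2 j =>
          (PySem.List.pyRange 0 (PySem.List.len lVow)).foldl (fun acc3 k =>
            if PySem.Str.pyGet? w j = PySem.List.pyGet? lVow k then acc3 + 1 else acc3) acc2) 0
      if compteur ≥ 2 then acc + 1 else acc) 0
  (compteurWordsVowels, compteurVowels, compteurWords)

-- ===== PORT B =====
def text_analysis_alt (text : String) : Int × Int × Int :=
  let vowels : List Char := ['a', 'e', 'i', 'o', 'u', 'y']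
  let words : List String := PySem.Str.split₀ text
  let r : Int × Int := words.foldl (fun s w =>
      let c : Int := (w.toList.countP (fun ch => vowels.contains ch) : Nat)
      (s.1 + (if 2 ≤ c then 1 else 0), s.2 + c)) (0, 0)
  (r.1, r.2, (words.length : Int))

-- ===== PRECONDITION & SPEC =====
def Spec_text_analysis (text : String) (out : Int × Int × Int) : Prop := out = text_analysis_alt text
instance (text : String) (out : Int × Int × Int) : Decidable (Spec_text_analysis text out) := by unfold Spec_text_analysis; infer_instance

-- ===== CLAIM (what is proved, stated in full; the proofs are below) =====
def Claim_equal_text_analysis : Prop := ∀ (text : String), Dom_text_analysis text → Spec_text_analysis text (text_analysis text)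

-- ===== LEMMAS AND PROOFS =====

def pvVow : List Char := ['a', 'e', 'i', 'o', 'u', 'y']

-- A's inner 6-way scan just adds 1 when the character is a vowel
theorem pv_innerA (oc : Option Char) (acc : Int) :
    (PySem.List.pyRange 0 (PySem.List.len pvVow)).foldl (fun a j =>
        if oc = PySem.List.pyGet? pvVow j then a + 1 else a) acc
      = acc + (match oc with
               | some c => if pvVow.contains c then (1 : Int) else 0
               | none => 0) := by
  have hr : PySem.List.pyRange 0 (PySem.List.len pvVow) = [0,1,2,3,4,5] := by decide
  rw [hr]
  cases oc with
  | none => simp [pvVow, PySem.List.pyGet?, PySem.List.pyIdx?]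
  | some c =>
    by_cases h : c ∈ pvVow
    · fin_cases h <;> simp [pvVow, PySem.List.pyGet?, PySem.List.pyIdx?]
    · have h1 : c ∉ (['a','e','i','o','u','y'] : List Char) := h
      simp only [List.mem_cons, not_or] at h1
      obtain ⟨n1, n2, n3, n4, n5, n6, -⟩ := h1
      simp [pvVow, PySem.List.pyGet?, PySem.List.pyIdx?, n1, n2, n3, n4, n5, n6]

theorem pv_sum_ite (p : Char → Bool) (cs : List Char) :
    (cs.map (fun c => if p c then (1 : Int) else 0)).sum = (cs.countP p : Nat) := by
  induction cs with
  | nil => simp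
  | cons c cs ih =>
    simp only [List.map_cons, List.sum_cons, List.countP_cons, ih]
    split_ifs <;> simp_all <;> omega

-- A's per-string double loop counts exactly the vowels of the string
theorem pv_countA (s : String) (acc : Int) :
    (PySem.List.pyRange 0 (PySem.Str.len s)).foldl (fun a i =>
        (PySem.List.pyRange 0 (PySem.List.len pvVow)).foldl (fun a2 j =>
          if PySem.Str.pyGet? s i = PySem.List.pyGet? pvVow j then a2 + 1 else a2) a) acc
      = acc + (s.toList.countP (fun ch => pvVow.contains ch) : Nat) := by
  have hlen : PySem.Str.len s = PySem.List.len s.toList := by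
    simp [PySem.Str.len_eq, PySem.List.len]
  rw [hlen]
  rw [PySem.List.foldl_congr_mem _ _
    (fun a i => a + (if pvVow.contains (PySem.List.pyGetD s.toList i ' ') then (1:Int) else 0)) _ ?_]
  · rw [PySem.List.foldl_add]
    congr 1
    rw [show (fun i => if pvVow.contains (PySem.List.pyGetD s.toList i ' ') then (1:Int) else 0)
        = (fun c => if pvVow.contains c then (1:Int) else 0) ∘ (fun i => PySem.List.pyGetD s.toList i ' ') from rfl,
      ← List.map_map, PySem.List.map_pyGetD_pyRange_zero, pv_sum_ite]
  · intro a i hi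
    rw [PySem.List.mem_pyRange_one] at hi
    simp only [PySem.List.len_eq] at hi
    have h1 : PySem.Str.pyGet? s i = some (s.toList[i.toNat]'(by omega)) := by
      simp only [PySem.Str.pyGet?_eq, PySem.Chars.pyGet?_eq_listPyGet?]
      exact PySem.List.pyGet?_eq_some_getElem _ hi.1 (by simpa using hi.2)
    have h2 : PySem.List.pyGetD s.toList i ' ' = s.toList[i.toNat]'(by omega) := by
      exact PySem.List.pyGetD_eq_getElem _ _ hi.1 (by simpa using hi.2)
    rw [h1, pv_innerA]; simp [h2]

-- concatenating the split words gives the non-whitespace characters in order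
theorem pv_go_flatten (s : List Char) : ∀ (cur : List Char) (acc : List (List Char)),
    (PySem.Chars.split₀.go s cur acc).flatten
      = acc.reverse.flatten ++ cur.reverse ++ s.filter (fun c => !PySem.Chars.isspace c) := by
  induction s with
  | nil =>
    intro cur acc
    simp only [PySem.Chars.split₀.go]
    split_ifs with h
    · simp_all [List.isEmpty_iff]
    · simp
  | cons c rest ih =>
    intro cur acc
    simp only [PySem.Chars.split₀.go, List.filter_cons]
    by_cases hs : PySem.Chars.isspace c = true
    · simp only [hs, if_true, Bool.not_true]
      by_cases hc : cur.isEmpty = true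
      · simp_all [List.isEmpty_iff]
      · rw [if_neg hc, ih]
        simp
    · rw [if_neg hs, ih]
      simp [hs]

theorem pv_split_flatten (s : List Char) :
    (PySem.Chars.split₀ s).flatten = s.filter (fun c => !PySem.Chars.isspace c) := by
  simp [PySem.Chars.split₀, pv_go_flatten]

-- a vowel is never whitespace
theorem pv_vow_not_space (a : Char) (h : pvVow.contains a = true) :
    PySem.Chars.isspace a = false := by
  have : a ∈ pvVow := by simpa using h
  fin_cases this <;> decide

-- vowels of the whole text = sum of vowels of its words
theorem pv_sum_words (text : String) :
    ((PySem.Str.split₀ text).map (fun w => ((w.toList.countP (fun ch => pvVow.contains ch) : Nat) : Int))).sum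
      = ((text.toList.countP (fun ch => pvVow.contains ch) : Nat) : Int) := by
  have hcast : ((PySem.Str.split₀ text).map (fun w => ((w.toList.countP (fun ch => pvVow.contains ch) : Nat) : Int))).sum
      = ((((PySem.Str.split₀ text).map (fun w => w.toList.countP (fun ch => pvVow.contains ch))).sum : Nat) : Int) := by
    rw [Nat.cast_list_sum, List.map_map]; rfl
  rw [hcast]
  congr 1
  have hmaps : (PySem.Str.split₀ text).map (fun w => w.toList.countP (fun ch => pvVow.contains ch))
      = ((PySem.Str.split₀ text).map String.toList).map (List.countP (fun ch => pvVow.contains ch)) := by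
    rw [List.map_map]; rfl
  rw [hmaps, PySem.Str.split₀_map_toList, ← List.countP_flatten, pv_split_flatten,
    List.countP_filter]
  refine List.countP_congr ?_
  intro a _
  cases hp : pvVow.contains a
  · simp
  · simp [pv_vow_not_space a hp]

-- ===== VERDICT (by name: the statement is the Claim_ definition above) =====
theorem text_analysis_spec : Claim_equal_text_analysis := by
  intro text _
  unfold Spec_text_analysis text_analysis text_analysis_alt
  simp only []
  rw [show (['a','e','i','o','u','y'] : List Char) = pvVow from rfl]
  rw [PySem.List.foldl_prod_mk
    (f := fun (a : Int) (w : String) => a + (if 2 ≤ ((w.toList.countP (fun ch => pvVow.contains ch) : Nat) : Int) then 1 else 0))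
    (g := fun (a : Int) (w : String) => a + ((w.toList.countP (fun ch => pvVow.contains ch) : Nat) : Int))]
  have hb : ∀ (a : Int) (w : String), w ∈ PySem.Str.split₀ text →
      (if (PySem.List.pyRange 0 (PySem.Str.len w)).foldl (fun acc2 j =>
          (PySem.List.pyRange 0 (PySem.List.len pvVow)).foldl (fun acc3 k =>
            if PySem.Str.pyGet? w j = PySem.List.pyGet? pvVow k then acc3 + 1 else acc3) acc2) (0 : Int) ≥ 2
        then a + 1 else a)
      = a + (if 2 ≤ ((w.toList.countP (fun ch => pvVow.contains ch) : Nat) : Int) then 1 else 0) := by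
    intro a w _
    simp only [pv_countA w 0, zero_add, ge_iff_le]
    split_ifs <;> simp
  refine Prod.ext ?_ (Prod.ext ?_ ?_)
  · simp only []
    rw [PySem.List.foldl_congr_mem _ _
      (fun (a : Int) (w : String) => a + (if 2 ≤ ((w.toList.countP (fun ch => pvVow.contains ch) : Nat) : Int) then 1 else 0)) _ hb]
  · simp only []
    rw [pv_countA text 0, PySem.List.foldl_add, pv_sum_words]
  · simp [PySem.List.len_eq]
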